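-- pv_equiv track=rewrite | github.com/brenodt/Desafio-365-dias-programando | all/045_Removendo_Enesimo_Elemento_Repitido.py | remove_enesimo
-- ===== SOURCE A (Python) =====
-- def remove_enesimo(lista: list, elemento: str, numero: int):
--     if numero > lista.count(elemento):
--         return "impossible"
--
--     contador = 0
--     for indice in range(0, len(lista)):
--         if lista[indice] == elemento:
--             contador += 1
--             if contador == numero:
--                 lista.pop(indice)
--                 break
--     return lista
-- ===== SOURCE B (Python) =====
-- def remove_enesimo(lista: list, elemento: str, numero: int):
--     # Build the occurrence-index table in one enumerate pass, then one positional pop.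
--     idx = [i for i, x in enumerate(lista) if x == elemento]
--     if numero > len(idx):
--         return "impossible"
--     if numero >= 1:
--         lista.pop(idx[numero - 1])
--     return lista
-- ===== Notes on version B (the rewrite author's own statement) =====
-- stated objective: idiomatic
-- what changed: Replaces the count()+counting index loop (scan, count occurrences, pop inside the loop and break) by an enumerate comprehension that builds the list of occurrence indices once, followed by a single positional pop at idx[numero-1].
-- outside the precondition, e.g. on remove_enesimo(['a'], 'b', 1): A returns 'impossible', B returns 'impossible'
import Mathlib
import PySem

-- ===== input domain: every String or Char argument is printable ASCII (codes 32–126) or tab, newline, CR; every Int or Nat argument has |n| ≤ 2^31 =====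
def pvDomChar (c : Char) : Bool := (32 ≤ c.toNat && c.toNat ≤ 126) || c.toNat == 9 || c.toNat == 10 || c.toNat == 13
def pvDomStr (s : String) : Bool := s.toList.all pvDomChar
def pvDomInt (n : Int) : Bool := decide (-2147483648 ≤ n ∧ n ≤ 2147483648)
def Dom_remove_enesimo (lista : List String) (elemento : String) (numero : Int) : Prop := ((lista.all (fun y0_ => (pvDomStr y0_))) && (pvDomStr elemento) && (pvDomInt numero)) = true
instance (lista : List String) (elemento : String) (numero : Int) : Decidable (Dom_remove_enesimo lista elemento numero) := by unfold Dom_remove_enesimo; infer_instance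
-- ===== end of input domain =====

-- B replaces A's count()+counting scan by an occurrence-index table built once with enumerate,
-- followed by one positional pop (objective: idiomatic). Both Pythons mutate `lista` in place the
-- same way; the equivalence proved here is about the RETURN value.

-- ===== PORT A =====
-- the Python 'for indice in range(0, len(lista))' loop, with its state (indice, contador)
def remove_enesimo_loop (lista : List String) (elemento : String) (numero : Int)
    (indice : Nat) (contador : Int) : List String :=
  if indice < lista.length then
    if PySem.List.pyGetD lista (indice : Int) "" = elemento then
      if contador + 1 = numero then
        match PySem.List.pop? lista (indice : Int) with
        | some r => r.2
        | none => lista          -- unreachable: indice < len lista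
      else remove_enesimo_loop lista elemento numero (indice + 1) (contador + 1)
    else remove_enesimo_loop lista elemento numero (indice + 1) contador
  else lista
termination_by lista.length - indice

def remove_enesimo (lista : List String) (elemento : String) (numero : Int) : List String :=
  if numero > (PySem.List.count lista elemento : Int) then
    lista  -- Python returns the string "impossible" here: excluded by Pre_ (not a List String)
  else remove_enesimo_loop lista elemento numero 0 0

-- ===== PORT B =====
-- idx = [i for i, x in enumerate(lista) if x == elemento]
def remove_enesimo_idx (lista : List String) (elemento : String) : List Int :=
  (PySem.List.enumerate lista 0).foldr (fun p acc => if p.2 = elemento then p.1 :: acc else acc) []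

def remove_enesimo_alt (lista : List String) (elemento : String) (numero : Int) : List String :=
  let idx := remove_enesimo_idx lista elemento
  if numero > (idx.length : Int) then
    lista  -- Python returns the string "impossible" here: excluded by Pre_ (not a List String)
  else if numero ≥ 1 then
    match PySem.List.pop? lista (PySem.List.pyGetD idx (numero - 1) 0) with
    | some r => r.2
    | none => lista              -- unreachable: the index is a valid position of lista
  else lista

-- ===== PRECONDITION & SPEC =====
-- Pre_ excludes exactly the inputs with numero > (number of occurrences of elemento), on which
-- the Python A (and B) returns the string "impossible" — not a value of the declared List type.
def Pre_remove_enesimo (lista : List String) (elemento : String) (numero : Int) : Prop :=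
  numero ≤ (lista.count elemento : Int)
instance (lista : List String) (elemento : String) (numero : Int) : Decidable (Pre_remove_enesimo lista elemento numero) := by unfold Pre_remove_enesimo; infer_instance

def pvWitness_remove_enesimo : List String × String × Int := (["a", "b", "a"], "a", 2)

def Spec_remove_enesimo (lista : List String) (elemento : String) (numero : Int) (out : List String) : Prop := out = remove_enesimo_alt lista elemento numero
instance (lista : List String) (elemento : String) (numero : Int) (out : List String) : Decidable (Spec_remove_enesimo lista elemento numero out) := by unfold Spec_remove_enesimo; infer_instance

-- ===== CLAIM (what is proved, stated in full; the proofs are below) =====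
def Claim_equal_remove_enesimo : Prop := ∀ (lista : List String) (elemento : String) (numero : Int), Dom_remove_enesimo lista elemento numero → Pre_remove_enesimo lista elemento numero → Spec_remove_enesimo lista elemento numero (remove_enesimo lista elemento numero)

-- ===== LEMMAS AND PROOFS =====

-- reference function: remove the numero-th occurrence (structural)
def rmN : List String → String → Int → List String
  | [], _, _ => []
  | x :: xs, e, n => if x = e then (if n = 1 then xs else x :: rmN xs e (n - 1)) else x :: rmN xs e n

theorem loop_no_hit (lista : List String) (e : String) (n : Int) (i : Nat) (c : Int)
    (h : n ≤ c) : remove_enesimo_loop lista e n i c = lista := by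
  fun_induction remove_enesimo_loop lista e n i c with
  | case1 => omega
  | case2 => omega
  | case3 _ _ _ _ _ ih => exact ih (by omega)
  | case4 _ _ _ _ ih => exact ih h
  | case5 => rfl

theorem loop_eq_rmN (lista : List String) (e : String) (n : Int) (i : Nat) (c : Int)
    (hi : i ≤ lista.length) (hc : c + 1 ≤ n)
    (hcnt : n - c ≤ ((lista.drop i).count e : Int)) :
    remove_enesimo_loop lista e n i c = lista.take i ++ rmN (lista.drop i) e (n - c) := by
  fun_induction remove_enesimo_loop lista e n i c with
  | case1 i c hlt hget heq r hpop =>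
    rw [PySem.List.pop?_natCast lista i hlt] at hpop
    rw [PySem.List.pyGetD_ofNat lista i "" hlt] at hget
    obtain rfl : r = (lista[i], lista.eraseIdx i) := by exact_mod_cast (Option.some_inj.mp hpop).symm
    rw [List.drop_eq_getElem_cons hlt, rmN, if_pos hget, if_pos (by omega),
      List.eraseIdx_eq_take_drop_succ]
  | case2 i c hlt hget heq hpop =>
    rw [PySem.List.pop?_natCast lista i hlt] at hpop; exact absurd hpop (by simp)
  | case3 i c hlt hget heq ih =>
    rw [PySem.List.pyGetD_ofNat lista i "" hlt] at hget
    have hd := List.drop_eq_getElem_cons hlt (l := lista)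
    have hcnt' : n - (c + 1) ≤ ((lista.drop (i+1)).count e : Int) := by
      rw [hd, List.count_cons, if_pos (by simpa using hget)] at hcnt; push_cast at hcnt ⊢; omega
    rw [ih (by omega) (by omega) hcnt', hd, rmN, if_pos hget, if_neg (by omega),
      List.take_add_one, List.getElem?_eq_getElem hlt]
    simp [hget]
    congr 1
    ring
  | case4 i c hlt hget ih =>
    rw [PySem.List.pyGetD_ofNat lista i "" hlt] at hget
    have hd := List.drop_eq_getElem_cons hlt (l := lista)
    have hcnt' : n - c ≤ ((lista.drop (i+1)).count e : Int) := by
      rw [hd, List.count_cons] at hcnt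
      rw [if_neg (by simpa using hget)] at hcnt
      push_cast at hcnt ⊢; omega
    rw [ih (by omega) hc hcnt', hd, rmN, if_neg hget,
      List.take_add_one, List.getElem?_eq_getElem hlt]
    simp only [Option.toList_some, List.append_assoc, List.singleton_append]
  | case5 i c hlt =>
    have : i = lista.length := by omega
    subst this
    simp at hcnt; omega

theorem idx_length (e : String) (lista : List String) (s : Int) :
    ((PySem.List.enumerate lista s).foldr
        (fun p acc => if p.2 = e then p.1 :: acc else acc) []).length = lista.count e := by
  induction lista generalizing s with
  | nil => simp [PySem.List.enumerate_nil]
  | cons x xs ih =>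
    rw [PySem.List.enumerate_cons]
    by_cases hx : x = e <;>
      simp [hx, ih]

theorem idx_spec (e : String) (lista : List String) (s : Nat) (n : Int)
    (h1 : 1 ≤ n) (h2 : n ≤ (lista.count e : Int)) :
    ∃ m : Nat,
      PySem.List.pyGetD ((PySem.List.enumerate lista (s : Int)).foldr
          (fun p acc => if p.2 = e then p.1 :: acc else acc) []) (n - 1) 0 = ((s + m : Nat) : Int)
      ∧ m < lista.length ∧ lista.eraseIdx m = rmN lista e n := by
  induction lista generalizing s n with
  | nil => simp at h2; omega
  | cons x xs ih =>
    rw [PySem.List.enumerate_cons]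
    by_cases hx : x = e
    · by_cases hn : n = 1
      · refine ⟨0, ?_, by simp, by simp [rmN, hx, hn]⟩
        subst hn
        simp [hx, PySem.List.pyGetD_zero_cons]
      · have h2' : n - 1 ≤ (xs.count e : Int) := by
          rw [List.count_cons, if_pos (by simpa using hx)] at h2; push_cast at h2 ⊢; omega
        obtain ⟨m', hget, hlt, herase⟩ := ih (s + 1) (n - 1) (by omega) h2'
        refine ⟨m' + 1, ?_, by simpa using hlt, ?_⟩
        · push_cast at hget
          have hlen : ((PySem.List.enumerate xs ((s : Int) + 1)).foldr
                (fun p acc => if p.2 = e then p.1 :: acc else acc) []).length = xs.count e :=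
            idx_length e xs _
          rw [List.foldr_cons, if_pos hx]
          rw [PySem.List.pyGetD_eq_getElem _ 0 (by omega) (by simp [hlen]; omega)]
          rw [PySem.List.pyGetD_eq_getElem _ 0 (by omega) (by rw [hlen]; omega)] at hget
          have hidx : ((n : Int) - 1).toNat = ((n - 1 : Int) - 1).toNat + 1 := by omega
          simp only [hidx, List.getElem_cons_succ]
          rw [hget]; push_cast; ring
        · rw [List.eraseIdx_cons_succ, herase, rmN, if_pos hx, if_neg hn]
    · have h2' : n ≤ (xs.count e : Int) := by
        rw [List.count_cons, if_neg (by simpa using hx)] at h2; simpa using h2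
      obtain ⟨m', hget, hlt, herase⟩ := ih (s + 1) n h1 h2'
      refine ⟨m' + 1, ?_, by simpa using hlt, ?_⟩
      · push_cast at hget
        rw [List.foldr_cons, if_neg hx, hget]; push_cast; ring_nf
      · rw [List.eraseIdx_cons_succ, herase, rmN, if_neg hx]

-- ===== VERDICT (by name: the statement is the Claim_ definition above) =====
theorem remove_enesimo_spec : Claim_equal_remove_enesimo := by
  intro lista e n _hdom hpre
  have hpre' : n ≤ (lista.count e : Int) := hpre
  show remove_enesimo lista e n = remove_enesimo_alt lista e n
  have hlenIdx : (remove_enesimo_idx lista e).length = lista.count e := by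
    unfold remove_enesimo_idx; exact idx_length e lista 0
  rw [remove_enesimo, if_neg (by rw [PySem.List.count_eq]; omega),
    remove_enesimo_alt]
  simp only [hlenIdx]
  rw [if_neg (by omega)]
  by_cases hn : 1 ≤ n
  · rw [if_pos (by omega)]
    obtain ⟨m, hget, hm, herase⟩ := idx_spec e lista 0 n hn hpre'
    have hget' : PySem.List.pyGetD (remove_enesimo_idx lista e) (n - 1) 0 = (m : Int) := by
      unfold remove_enesimo_idx
      simpa using hget
    rw [hget', PySem.List.pop?_natCast lista m hm, herase]
    rw [loop_eq_rmN lista e n 0 0 (by omega) (by omega) (by simpa using hpre')]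
    simp
  · rw [if_neg (by omega)]
    exact loop_no_hit lista e n 0 0 (by omega)
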